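-- pv_equiv track=rewrite | github.com/Semeriuss/A2SV-Labs | contest_problems/code_forces_18/A.py | solve
-- ===== SOURCE A (Python) =====
-- def solve(n, m):
--     a, b = n - 1, m - 1
--     if a > 1 and b == 0 or b > 1 and a == 0:
--         return -1
--     count = 0
--     while a > 0 and b > 0:
--         a -= 1
--         b -= 1
--         count += 2
--     if a > 0:
--         if a % 2 == 0:
--             count += (a * 2)
--         else:
--             count += (a * 2) - 1
--     elif b > 0:
--         if a % 2 == 0:
--             count += (b * 2)
--         else:
--             count += (b * 2) - 1
--
--     return count
-- ===== SOURCE B (Python) =====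
-- def solve(n, m):
--     a, b = n - 1, m - 1
--     if (a > 1 and b == 0) or (b > 1 and a == 0):
--         return -1
--     t = min(a, b) if (a > 0 and b > 0) else 0
--     ra, rb = a - t, b - t
--     r = ra if ra > 0 else rb
--     if r > 0:
--         return 2 * t + 2 * r - (ra % 2)
--     return 2 * t
-- ===== Notes on version B (the rewrite author's own statement) =====
-- stated objective: faster
-- what changed: Replaced A's O(min(n,m)) decrement-both loop with an O(1) closed form: 2*min(a,b) plus the remainder handled by a single parity subtraction.
import Mathlib
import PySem

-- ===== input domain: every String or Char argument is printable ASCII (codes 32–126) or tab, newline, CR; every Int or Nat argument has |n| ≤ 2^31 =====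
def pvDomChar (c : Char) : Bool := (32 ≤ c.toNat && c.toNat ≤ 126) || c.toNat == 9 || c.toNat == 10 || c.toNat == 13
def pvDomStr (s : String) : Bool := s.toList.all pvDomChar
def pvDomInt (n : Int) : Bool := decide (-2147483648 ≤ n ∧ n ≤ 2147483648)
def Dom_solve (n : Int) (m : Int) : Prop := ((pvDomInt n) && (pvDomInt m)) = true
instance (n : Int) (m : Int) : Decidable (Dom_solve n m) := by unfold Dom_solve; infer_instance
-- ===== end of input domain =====

-- B replaces A's O(min(n,m)) decrement loop by an O(1) closed form (2*min plus remainder parity); objective: faster.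

-- ===== PORT A =====
-- the 'while a > 0 and b > 0' loop of A, step for step
def solveLoop (a b count : Int) : Int × Int × Int :=
  if _h : a > 0 ∧ b > 0 then solveLoop (a - 1) (b - 1) (count + 2) else (a, b, count)
  termination_by a.toNat
  decreasing_by omega

def solve (n : Int) (m : Int) : Int :=
  let a := n - 1
  let b := m - 1
  if (a > 1 ∧ b = 0) ∨ (b > 1 ∧ a = 0) then -1
  else
    let (a, b, count) := solveLoop a b 0
    if a > 0 then
      if PySem.Int.mod a 2 = 0 then count + a * 2 else count + a * 2 - 1
    else if b > 0 then
      if PySem.Int.mod a 2 = 0 then count + b * 2 else count + b * 2 - 1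
    else count

-- ===== PORT B =====
def solve_alt (n : Int) (m : Int) : Int :=
  let a := n - 1
  let b := m - 1
  if (a > 1 ∧ b = 0) ∨ (b > 1 ∧ a = 0) then -1
  else
    let t := if a > 0 ∧ b > 0 then min a b else 0
    let ra := a - t
    let rb := b - t
    let r := if ra > 0 then ra else rb
    if r > 0 then 2 * t + 2 * r - PySem.Int.mod ra 2
    else 2 * t

-- ===== PRECONDITION & SPEC =====
def Spec_solve (n : Int) (m : Int) (out : Int) : Prop := out = solve_alt n m
instance (n : Int) (m : Int) (out : Int) : Decidable (Spec_solve n m out) := by unfold Spec_solve; infer_instance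

-- ===== CLAIM (what is proved, stated in full; the proofs are below) =====
def Claim_equal_solve : Prop := ∀ (n : Int) (m : Int), Dom_solve n m → Spec_solve n m (solve n m)

-- ===== LEMMAS AND PROOFS =====
theorem solveLoop_closed (a b count : Int) :
    solveLoop a b count =
      if a > 0 ∧ b > 0 then (a - min a b, b - min a b, count + 2 * min a b)
      else (a, b, count) := by
  fun_induction solveLoop a b count with
  | case1 a b count h ih =>
    rw [if_pos h]
    rw [ih]
    split_ifs with h2
    · refine Prod.ext ?_ (Prod.ext ?_ ?_) <;> simp <;> omega
    · refine Prod.ext ?_ (Prod.ext ?_ ?_) <;> simp <;> omega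
  | case2 a b count h =>
    rw [if_neg h]

theorem mod_two_cases (a : Int) : PySem.Int.mod a 2 = 0 ∨ PySem.Int.mod a 2 = 1 := by
  have h1 := PySem.Int.mod_nonneg a (b := 2) (by omega)
  have h2 := PySem.Int.mod_lt a (b := 2) (by omega)
  omega

-- ===== VERDICT (by name: the statement is the Claim_ definition above) =====
theorem solve_spec : Claim_equal_solve := by
  intro n m _
  unfold Spec_solve solve solve_alt
  simp only [solveLoop_closed]
  set a := n - 1 with ha
  set b := m - 1 with hb
  have h1 := mod_two_cases (a - min a b)
  have h2 := PySem.Int.mod_eq_zero_iff_dvd (a - min a b) 2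
  have h3 := mod_two_cases a
  have h4 := PySem.Int.mod_eq_zero_iff_dvd a 2
  have h5 := mod_two_cases (a - 0)
  have h6 := PySem.Int.mod_eq_zero_iff_dvd (a - 0) 2
  split_ifs <;> dsimp only at * <;> omega
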